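-- pv_equiv track=rewrite | github.com/dan-sazonov/olymp-playground | ЕГЭ/22/13631.py | f
-- ===== SOURCE A (Python) =====
-- def f(x):
--     a = 0
--     b = 1
--     while x > 0:
--         a = a + 1
--         b = b * (x % 10)
--         x = x // 10
--     return a, b
-- ===== SOURCE B (Python) =====
-- def f(x):
--     if x <= 0:
--         return 0, 1
--     s = str(x)
--     p = 1
--     for c in s:
--         p = p * int(c)
--     return len(s), p
-- ===== Notes on version B (the rewrite author's own statement) =====
-- stated objective: idiomatic
-- what changed: B replaces the modular extraction loop (repeated %10 and //10) with string conversion: it takes len(str(x)) for the digit count and multiplies int(c) over the characters of str(x); nonpositive x keeps the loop-never-runs value (0, 1) via a guard.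
import Mathlib
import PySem

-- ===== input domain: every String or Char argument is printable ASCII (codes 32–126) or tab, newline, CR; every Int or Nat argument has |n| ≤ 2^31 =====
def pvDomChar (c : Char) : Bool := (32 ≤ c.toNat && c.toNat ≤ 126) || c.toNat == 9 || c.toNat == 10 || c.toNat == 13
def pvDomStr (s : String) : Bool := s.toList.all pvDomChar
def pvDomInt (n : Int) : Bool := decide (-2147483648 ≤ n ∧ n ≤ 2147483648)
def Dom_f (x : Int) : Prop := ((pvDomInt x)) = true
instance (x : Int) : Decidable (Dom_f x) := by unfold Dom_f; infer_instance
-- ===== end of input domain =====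

-- B counts digits as len(str(x)) and multiplies int(c) over str(x) (guard: (0, 1) for x ≤ 0),
-- replacing A's %10 / //10 extraction loop; objective: idiomatic, same cost.

-- ===== PORT A =====
-- the while loop of A, state (x, a, b)
def fLoop (x a b : Int) : Int × Int :=
  if 0 < x then
    fLoop (PySem.Int.floordiv x 10) (a + 1) (b * PySem.Int.mod x 10)
  else (a, b)
termination_by x.toNat
decreasing_by
  rw [PySem.Int.floordiv_eq_ediv_of_pos (by omega)]
  omega

def f (x : Int) : Int × Int := fLoop x 0 1

-- ===== PORT B =====
-- int(c) is ported as c.toNat - 48: exact for the decimal digit characters str(x) yields when x > 0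
def f_alt (x : Int) : Int × Int :=
  if x ≤ 0 then (0, 1)
  else
    let s := PySem.Int.toStr x
    (PySem.Str.len s, s.toList.foldl (fun p c => p * ((c.toNat : Int) - 48)) 1)

-- ===== PRECONDITION & SPEC =====
def Spec_f (x : Int) (out : Int × Int) : Prop := out = f_alt x
instance (x : Int) (out : Int × Int) : Decidable (Spec_f x out) := by unfold Spec_f; infer_instance

-- ===== CLAIM (what is proved, stated in full; the proofs are below) =====
def Claim_equal_f : Prop := ∀ (x : Int), Dom_f x → Spec_f x (f x)

-- ===== LEMMAS AND PROOFS =====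

-- Nat.toDigits 10 on a positive n is the reversed digit-character list of Nat.digits 10 n
lemma toDigitsCore_eq (f : Nat) : ∀ (n : Nat) (l : List Char), 0 < n → n < f →
    Nat.toDigitsCore 10 f n l = ((Nat.digits 10 n).map Nat.digitChar).reverse ++ l := by
  induction f with
  | zero => intro n l h1 h2; omega
  | succ f ih =>
    intro n l h1 h2
    rw [Nat.toDigitsCore]
    rw [Nat.digits_def' (by norm_num : 1 < 10) h1]
    by_cases hd : n / 10 = 0
    · have hn : n < 10 := by omega
      simp [hd]
    · have hpos : 0 < n / 10 := Nat.pos_of_ne_zero hd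
      have hlt : n / 10 < f := by omega
      simp only [hd, if_false, ih (n / 10) _ hpos hlt]
      simp

lemma toDigits10_eq (n : Nat) (h : 0 < n) :
    Nat.toDigits 10 n = ((Nat.digits 10 n).map Nat.digitChar).reverse := by
  have := toDigitsCore_eq (n + 1) n [] h (by omega)
  simpa [Nat.toDigits] using this

lemma digitChar_toNat (d : Nat) (h : d < 10) :
    ((Nat.digitChar d).toNat : Int) - 48 = (d : Int) := by
  interval_cases d <;> decide

-- characterisation of A's loop by the base-10 digit list
lemma fLoop_eq (n : Nat) : ∀ (a b : Int),
    fLoop (n : Int) a b =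
      (a + ((Nat.digits 10 n).length : Int), b * ((Nat.digits 10 n).prod : Int)) := by
  induction n using Nat.strong_induction_on with
  | _ n ih =>
    intro a b
    rw [fLoop]
    by_cases h : 0 < n
    · have hfd : PySem.Int.floordiv (n : Int) 10 = ((n / 10 : Nat) : Int) :=
        PySem.Int.floordiv_natCast n 10
      have hmd : PySem.Int.mod (n : Int) 10 = ((n % 10 : Nat) : Int) :=
        PySem.Int.mod_natCast n 10
      have hlt : n / 10 < n := Nat.div_lt_self h (by norm_num)
      rw [if_pos (show (0 : Int) < (n : Int) from by exact_mod_cast h), hfd, hmd,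
        ih (n / 10) hlt, Nat.digits_def' (by norm_num : 1 < 10) h]
      simp only [List.prod_cons, List.length_cons]
      refine Prod.ext ?_ ?_
      · push_cast; ring
      · push_cast; ring
    · have h0 : n = 0 := by omega
      subst h0
      simp

lemma prod_foldl (l : List Char) :
    l.foldl (fun p c => p * ((c.toNat : Int) - 48)) 1 =
      (l.map (fun c => ((c.toNat : Int) - 48))).prod := by
  rw [List.prod_eq_foldl, List.foldl_map]

-- ===== VERDICT (by name: the statement is the Claim_ definition above) =====
theorem f_spec : Claim_equal_f := by
  intro x _
  unfold Spec_f f f_alt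
  by_cases hx : x ≤ 0
  · rw [fLoop]
    simp [hx, show ¬ (0 : Int) < x from by omega]
  · have hpos : 0 < x := by omega
    set n := x.toNat with hn
    have hxn : x = (n : Int) := by omega
    have hnpos : 0 < n := by omega
    simp only [hx, if_false]
    rw [hxn, fLoop_eq n 0 1, zero_add, one_mul]
    have hs : (PySem.Int.toStr (n : Int)).toList = Nat.toDigits 10 n := by
      rw [PySem.Int.toList_toStr]
      simp [PySem.Int.toChars, show ¬ ((n : Int) < 0) from by omega]
    have hdig : Nat.toDigits 10 n = ((Nat.digits 10 n).map Nat.digitChar).reverse :=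
      toDigits10_eq n hnpos
    have hlen : PySem.Str.len (PySem.Int.toStr (n : Int)) = ((Nat.digits 10 n).length : Int) := by
      rw [PySem.Str.len_eq, hs, hdig]
      simp
    have hprod : (PySem.Int.toStr (n : Int)).toList.foldl
        (fun p c => p * ((c.toNat : Int) - 48)) 1 = ((Nat.digits 10 n).prod : Int) := by
      rw [prod_foldl, hs, hdig, List.map_reverse, List.prod_reverse, List.map_map,
        Nat.cast_list_prod]
      congr 1
      apply List.map_congr_left
      intro d hd
      exact digitChar_toNat d (Nat.digits_lt_base (by norm_num) hd)
    rw [hlen, hprod]
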